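-- pv_equiv track=rewrite | github.com/calini/GUH2017 | main.py | find_intended_websites
-- ===== SOURCE A (Python) =====
-- def find_intended_websites(websites, emails):
--     intended_websites = []
--     for email in emails:
--         intended_websites.append([])
--         for website in websites:
--             if website.lower() in email.lower():
--                 intended_websites[-1].append(website)
--
--     return intended_websites
-- ===== SOURCE B (Python) =====
-- def find_intended_websites(websites, emails):
--     # Enumerate every substring of each email (up to the longest website length)
--     # into a hash set once, then select websites by set membership instead of
--     # running a substring search for every (email, website) pair.
--     lowered = [w.lower() for w in websites]
--     maxlen = max(map(len, lowered), default=0)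
--
--     def matches(email):
--         el = email.lower()
--         subs = {el[i:i + n] for n in range(maxlen + 1)
--                 for i in range(len(el) - n + 1)}
--         return [w for w, wl in zip(websites, lowered) if wl in subs]
--
--     return [matches(email) for email in emails]
-- ===== Notes on version B (the rewrite author's own statement) =====
-- stated objective: alternative
-- what changed: B builds, per email, a hash set of all lowercase substrings up to the longest website length and selects websites by set membership, replacing A's per-(email,website) substring search (and A's repeated re-lowercasing).
import Mathlib
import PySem

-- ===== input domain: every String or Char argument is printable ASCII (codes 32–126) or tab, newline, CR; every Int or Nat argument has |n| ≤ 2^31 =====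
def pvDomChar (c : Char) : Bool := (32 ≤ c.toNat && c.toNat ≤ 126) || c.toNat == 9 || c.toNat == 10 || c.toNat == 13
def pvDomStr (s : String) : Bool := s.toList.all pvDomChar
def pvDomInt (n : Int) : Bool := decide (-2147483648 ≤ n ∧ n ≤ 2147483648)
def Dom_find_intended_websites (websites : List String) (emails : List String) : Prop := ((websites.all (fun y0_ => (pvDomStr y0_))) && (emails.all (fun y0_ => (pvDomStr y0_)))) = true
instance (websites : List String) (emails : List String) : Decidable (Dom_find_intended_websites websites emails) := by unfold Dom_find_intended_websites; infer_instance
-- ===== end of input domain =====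

-- B builds, per email, a set of all lowercase substrings up to the longest website length and
-- selects websites by set membership instead of a per-(email,website) substring search; same
-- return value, no speed claim.

-- ===== PORT A =====
def find_intended_websites (websites : List String) (emails : List String) : List (List String) :=
  emails.foldl (fun intended email =>
    intended ++ [websites.foldl (fun cur website =>
      if PySem.Str.isIn (PySem.Str.lower website) (PySem.Str.lower email)
      then cur ++ [website] else cur) []]) []

-- ===== PORT B =====
def find_intended_websites_alt (websites : List String) (emails : List String) : List (List String) :=
  let lowered : List (List Char) := websites.map (fun w => (PySem.Str.lower w).toList)
  let maxlen : Int := (lowered.map (fun wl => (wl.length : Int))).foldl max 0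
  emails.map (fun email =>
    let el : List Char := (PySem.Str.lower email).toList
    let subs : PySem.Set (List Char) := PySem.Set.ofList
      ((PySem.List.pyRange 0 (maxlen + 1) 1).flatMap (fun n =>
        (PySem.List.pyRange 0 ((el.length : Int) - n + 1) 1).map (fun i =>
          PySem.List.slice el (some i) (some (i + n)))))
    ((websites.zip lowered).filter (fun p => PySem.Set.contains subs p.2)).map Prod.fst)

-- ===== PRECONDITION & SPEC =====
def Spec_find_intended_websites (websites : List String) (emails : List String) (out : List (List String)) : Prop := out = find_intended_websites_alt websites emails
instance (websites : List String) (emails : List String) (out : List (List String)) : Decidable (Spec_find_intended_websites websites emails out) := by unfold Spec_find_intended_websites; infer_instance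

-- ===== CLAIM (what is proved, stated in full; the proofs are below) =====
def Claim_equal_find_intended_websites : Prop := ∀ (websites : List String) (emails : List String), Dom_find_intended_websites websites emails → Spec_find_intended_websites websites emails (find_intended_websites websites emails)

-- ===== LEMMAS AND PROOFS =====

-- zipping a list with a map of itself pairs each element with its image
theorem pv_zip_map_self {α β : Type} (l : List α) (f : α → β) :
    l.zip (l.map f) = l.map (fun x => (x, f x)) := by
  induction l with
  | nil => rfl
  | cons x xs ih => simp [ih]

-- Membership in B's substring list is exactly Python's 'wl in el', provided |wl| ≤ maxlen.
theorem pv_mem_subs_iff (el wl : List Char) (maxlen : Int)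
    (hlen : (wl.length : Int) ≤ maxlen) :
    (wl ∈ (PySem.List.pyRange 0 (maxlen + 1) 1).flatMap (fun n =>
        (PySem.List.pyRange 0 ((el.length : Int) - n + 1) 1).map (fun i =>
          PySem.List.slice el (some i) (some (i + n)))))
      ↔ PySem.Chars.isIn wl el = true := by
  constructor
  · intro h
    rw [List.mem_flatMap] at h
    obtain ⟨n, hn, h⟩ := h
    rw [List.mem_map] at h
    obtain ⟨i, hi, hs⟩ := h
    rw [PySem.List.mem_pyRange_one] at hn hi
    rw [← PySem.Chars.exists_prefix_drop_iff_isIn]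
    refine ⟨i.toNat, ?_⟩
    rw [← hs, PySem.List.slice_toNat el hi.1 (by omega)]
    exact List.take_prefix _ _
  · intro h
    obtain ⟨s, t, hst⟩ := (PySem.Chars.isIn_iff_infix wl el).mp h
    have hlens : el.length = s.length + wl.length + t.length := by
      rw [← hst]; simp; omega
    rw [List.mem_flatMap]
    refine ⟨(wl.length : Int), ?_, ?_⟩
    · rw [PySem.List.mem_pyRange_one]
      constructor
      · exact Int.natCast_nonneg _
      · omega
    · rw [List.mem_map]
      refine ⟨(s.length : Int), ?_, ?_⟩
      · rw [PySem.List.mem_pyRange_one]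
        constructor
        · exact Int.natCast_nonneg _
        · omega
      · rw [PySem.List.slice_natCast_add, ← hst, List.append_assoc, List.drop_left,
            List.take_left]

-- ===== VERDICT (by name: the statement is the Claim_ definition above) =====
theorem find_intended_websites_spec : Claim_equal_find_intended_websites := by
  intro ws es _
  unfold Spec_find_intended_websites find_intended_websites
  rw [PySem.List.foldl_append_singleton_eq_map, List.nil_append]
  have hB : find_intended_websites_alt ws es = es.map (fun email =>
      ((ws.zip (ws.map (fun w => (PySem.Str.lower w).toList))).filter (fun p =>
        PySem.Set.contains (PySem.Set.ofList
          ((PySem.List.pyRange 0 (((ws.map (fun w => (PySem.Str.lower w).toList)).map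
              (fun wl => (wl.length : Int))).foldl max 0 + 1) 1).flatMap (fun n =>
            (PySem.List.pyRange 0 (((PySem.Str.lower email).toList.length : Int) - n + 1) 1).map (fun i =>
              PySem.List.slice (PySem.Str.lower email).toList (some i) (some (i + n)))))) p.2)).map
        Prod.fst) := rfl
  rw [hB]
  apply List.map_congr_left
  intro email _
  rw [PySem.List.foldl_append_if_eq_filter, List.nil_append,
      pv_zip_map_self, List.filter_map, List.map_map]
  have hfst : Prod.fst ∘ (fun w : String => (w, (PySem.Str.lower w).toList)) = id := rfl
  rw [hfst, List.map_id]
  apply List.filter_congr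
  intro w hw
  have hlen : (((PySem.Str.lower w).toList.length : Int)) ≤
      ((ws.map (fun w => (PySem.Str.lower w).toList)).map (fun wl => (wl.length : Int))).foldl max 0 :=
    (PySem.List.le_foldl_max _ _).2 _
      (List.mem_map_of_mem (List.mem_map_of_mem hw))
  have h1 := pv_mem_subs_iff (PySem.Str.lower email).toList (PySem.Str.lower w).toList _ hlen
  have h2 : PySem.Str.isIn (PySem.Str.lower w) (PySem.Str.lower email)
      = PySem.Chars.isIn (PySem.Str.lower w).toList (PySem.Str.lower email).toList := by
    simp [PySem.Str.isIn]
  have h3 : ((PySem.Set.ofList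
      ((PySem.List.pyRange 0 (((ws.map (fun w => (PySem.Str.lower w).toList)).map
          (fun wl => (wl.length : Int))).foldl max 0 + 1) 1).flatMap (fun n =>
        (PySem.List.pyRange 0 (((PySem.Str.lower email).toList.length : Int) - n + 1) 1).map (fun i =>
          PySem.List.slice (PySem.Str.lower email).toList (some i) (some (i + n)))))).contains
        (PySem.Str.lower w).toList = true)
      ↔ PySem.Chars.isIn (PySem.Str.lower w).toList (PySem.Str.lower email).toList = true :=
    (PySem.Set.contains_iff _ _).trans ((PySem.Set.mem_ofList _ _).trans h1)
  rw [h2]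
  simp only [Function.comp_apply]
  exact (Bool.eq_iff_iff.mpr h3).symm
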